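-- pv_equiv track=rewrite | github.com/petmila/ITMO-AppliedMath | lab2-5sem/simplex__lab_1.py | check_for_basis_vector
-- ===== SOURCE A (Python) =====
-- def check_for_basis_vector(vector):
--   ones_count = 0
--   zero_count = 0
--   for el in vector:
--     if el == 0:
--       zero_count += 1
--     elif el == 1 or el == -1:
--       ones_count += 1
--   return ones_count == 1 and zero_count == len(vector) - 1
-- ===== SOURCE B (Python) =====
-- def check_for_basis_vector(vector):
--   it = iter(vector)
--   for x in it:
--     if x != 0:
--       # first nonzero must be +/-1 and everything after it must be zero
--       return (x == 1 or x == -1) and all(y == 0 for y in it)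
--   return False
-- ===== Notes on version B (the rewrite author's own statement) =====
-- stated objective: alternative
-- what changed: Replaces the whole-vector counter accumulation and final count arithmetic with an early-exit scan: locate the first nonzero element, require it to be +/-1, and require the remaining suffix to be all zeros (short-circuiting on any later nonzero).
import Mathlib
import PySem

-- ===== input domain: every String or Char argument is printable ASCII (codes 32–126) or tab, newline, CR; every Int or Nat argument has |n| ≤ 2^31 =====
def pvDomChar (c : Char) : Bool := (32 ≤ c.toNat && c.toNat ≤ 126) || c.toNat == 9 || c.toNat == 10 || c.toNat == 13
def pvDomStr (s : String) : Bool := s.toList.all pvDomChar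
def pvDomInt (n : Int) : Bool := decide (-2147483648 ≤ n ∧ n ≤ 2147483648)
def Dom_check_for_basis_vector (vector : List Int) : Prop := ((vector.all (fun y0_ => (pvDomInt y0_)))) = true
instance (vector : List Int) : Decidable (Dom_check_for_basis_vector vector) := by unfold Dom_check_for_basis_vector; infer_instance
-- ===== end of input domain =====

-- B replaces A's whole-vector zero/one counters with an early-exit scan:
-- the first nonzero element must be ±1 and the suffix after it all zeros (alternative decomposition).

-- ===== PORT A =====
-- counter loop: (ones_count, zero_count) accumulated over the vector, then
-- 'ones_count == 1 and zero_count == len(vector) - 1'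
def check_for_basis_vector (vector : List Int) : Bool :=
  let st := vector.foldl
    (fun (acc : Int × Int) el =>
      if el = 0 then (acc.1, acc.2 + 1)
      else if el = 1 ∨ el = -1 then (acc.1 + 1, acc.2)
      else acc)
    (0, 0)
  decide (st.1 = 1 ∧ st.2 = (vector.length : Int) - 1)

-- ===== PORT B =====
-- scan to the first nonzero x: return (x == 1 or x == -1) and all remaining are zero;
-- if no nonzero is found, return False
def check_for_basis_vector_alt : List Int → Bool
  | [] => false
  | x :: xs =>
    if x ≠ 0 then (x == 1 || x == -1) && xs.all (fun y => y == 0)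
    else check_for_basis_vector_alt xs

-- ===== PRECONDITION & SPEC =====
def Spec_check_for_basis_vector (vector : List Int) (out : Bool) : Prop := out = check_for_basis_vector_alt vector
instance (vector : List Int) (out : Bool) : Decidable (Spec_check_for_basis_vector vector out) := by unfold Spec_check_for_basis_vector; infer_instance

-- ===== CLAIM (what is proved, stated in full; the proofs are below) =====
def Claim_equal_check_for_basis_vector : Prop := ∀ (vector : List Int), Dom_check_for_basis_vector vector → Spec_check_for_basis_vector vector (check_for_basis_vector vector)

-- ===== LEMMAS AND PROOFS =====

-- what A's ones_count adds over a list
def pvOnes : List Int → Int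
  | [] => 0
  | x :: xs => (if x = 0 then 0 else if x = 1 ∨ x = -1 then 1 else 0) + pvOnes xs

-- what A's zero_count adds over a list
def pvZeros : List Int → Int
  | [] => 0
  | x :: xs => (if x = 0 then 1 else 0) + pvZeros xs

theorem pv_loop_counts (vector : List Int) (o z : Int) :
    vector.foldl
      (fun (acc : Int × Int) el =>
        if el = 0 then (acc.1, acc.2 + 1)
        else if el = 1 ∨ el = -1 then (acc.1 + 1, acc.2)
        else acc)
      (o, z)
    = (o + pvOnes vector, z + pvZeros vector) := by
  induction vector generalizing o z with
  | nil => simp [pvOnes, pvZeros]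
  | cons x xs ih =>
    rw [List.foldl_cons]
    split_ifs with h0 h1
    · rw [ih]; simp [pvOnes, pvZeros, h0]; ring
    · rw [ih]; simp [pvOnes, pvZeros, h0, h1]; ring
    · rw [ih]; simp [pvOnes, pvZeros, h0, h1]

theorem pv_zeros_le (xs : List Int) : pvZeros xs ≤ (xs.length : Int) := by
  induction xs with
  | nil => simp [pvZeros]
  | cons x xs ih =>
    unfold pvZeros
    simp only [List.length_cons]
    push_cast
    split_ifs <;> omega

-- zero_count saturates exactly on the all-zero lists
theorem pv_zeros_full (xs : List Int) :
    pvZeros xs = (xs.length : Int) ↔ xs.all (fun y => y == 0) = true := by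
  induction xs with
  | nil => simp [pvZeros]
  | cons x xs ih =>
    unfold pvZeros
    simp only [List.all_cons, Bool.and_eq_true, beq_iff_eq, List.length_cons]
    have hle := pv_zeros_le xs
    constructor
    · intro h
      split_ifs at h with hx
      · push_cast at h
        exact ⟨hx, ih.mp (by omega)⟩
      · push_cast at h; omega
    · rintro ⟨hx, hall⟩
      rw [if_pos hx, ih.mpr hall]; push_cast; ring

theorem pv_ones_zero_of_all (xs : List Int) (h : xs.all (fun y => y == 0) = true) :
    pvOnes xs = 0 := by
  induction xs with
  | nil => rfl
  | cons x xs ih =>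
    simp only [List.all_cons, Bool.and_eq_true, beq_iff_eq] at h
    simp [pvOnes, h.1, ih h.2]

theorem pv_main (vector : List Int) :
    decide (pvOnes vector = 1 ∧ pvZeros vector = (vector.length : Int) - 1)
      = check_for_basis_vector_alt vector := by
  induction vector with
  | nil => simp [pvOnes, pvZeros, check_for_basis_vector_alt]
  | cons x xs ih =>
    unfold check_for_basis_vector_alt
    by_cases hx : x = 0
    · rw [if_neg (by simp [hx]), ← ih]
      simp only [pvOnes, pvZeros, if_pos hx]
      rw [decide_eq_decide]
      simp only [List.length_cons]
      push_cast
      omega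
    · rw [if_pos (by simp [hx])]
      simp only [pvOnes, pvZeros, if_neg hx]
      by_cases hpm : x = 1 ∨ x = -1
      · have hb : (x == 1 || x == -1) = true := by rcases hpm with h | h <;> simp [h]
        simp only [if_pos hpm, hb, Bool.true_and]
        rcases hall : xs.all (fun y => y == 0) with _ | _
        · simp only [decide_eq_false_iff_not, not_and]
          intro _ h2
          have hz : pvZeros xs = (xs.length : Int) := by
            simp only [List.length_cons] at h2; push_cast at h2; omega
          simp [(pv_zeros_full xs).mp hz] at hall
        · have hz := (pv_zeros_full xs).mpr hall
          have ho := pv_ones_zero_of_all xs hall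
          simp only [decide_eq_true_eq, ho, hz, List.length_cons]
          push_cast
          exact ⟨trivial, by omega⟩
      · have hb : (x == 1 || x == -1) = false := by
          simp only [Bool.or_eq_false_iff, beq_eq_false_iff_ne]
          exact ⟨fun h => hpm (Or.inl h), fun h => hpm (Or.inr h)⟩
        simp only [if_neg hpm, hb, Bool.false_and]
        simp only [decide_eq_false_iff_not, not_and]
        intro h1 h2
        have hz : pvZeros xs = (xs.length : Int) := by
          simp only [List.length_cons] at h2; push_cast at h2; omega
        have ho := pv_ones_zero_of_all xs ((pv_zeros_full xs).mp hz)
        omega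

-- ===== VERDICT (by name: the statement is the Claim_ definition above) =====
theorem check_for_basis_vector_spec : Claim_equal_check_for_basis_vector := by
  intro vector _
  unfold Spec_check_for_basis_vector check_for_basis_vector
  rw [pv_loop_counts]
  simpa using pv_main vector
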